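-- pv_equiv track=rewrite | github.com/jihane1007/assignment2_Bioinformatics | rabbits_fibb.py | rabbits_fibb
-- ===== SOURCE A (Python) =====
-- def rabbits_fibb(n,m):
--     dpArray=[0]*n
--     dpArray[0]=1
--     for i in range(1,n):
--         if i<m:
--             dpArray[i]=sum(dpArray[:i])
--         else:
--             dpArray[i]=sum(dpArray[i-m:i])
--
--     return dpArray[-1]
-- ===== SOURCE B (Python) =====
-- def rabbits_fibb(n, m):
--     if m <= 0:
--         # window of previous m terms is empty: every term after the first is 0
--         return 1 if n == 1 else 0
--     dp = [0] * n
--     dp[0] = 1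
--     s = 1  # running sum of the sliding window dp[max(0, i-m):i]
--     for i in range(1, n):
--         dp[i] = s
--         s += dp[i]
--         if i - m >= 0:
--             s -= dp[i - m]
--     return dp[n - 1]
-- ===== Notes on version B (the rewrite author's own statement) =====
-- stated objective: faster
-- what changed: B maintains the window total incrementally (add the newly produced term, subtract the term that leaves the m-wide window) instead of A's re-summation of a slice of dp at every step, turning the O(n*m) loop into O(n).
import Mathlib
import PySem

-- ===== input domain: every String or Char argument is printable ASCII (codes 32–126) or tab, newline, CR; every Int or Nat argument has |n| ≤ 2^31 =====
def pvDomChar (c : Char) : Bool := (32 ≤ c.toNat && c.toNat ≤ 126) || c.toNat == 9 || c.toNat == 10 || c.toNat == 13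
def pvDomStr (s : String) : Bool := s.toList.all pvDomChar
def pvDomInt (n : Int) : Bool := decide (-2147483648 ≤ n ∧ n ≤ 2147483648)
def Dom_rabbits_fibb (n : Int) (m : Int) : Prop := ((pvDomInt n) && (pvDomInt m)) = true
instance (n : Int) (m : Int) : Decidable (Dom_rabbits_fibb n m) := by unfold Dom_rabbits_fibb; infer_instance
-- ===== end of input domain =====

-- B replaces A's per-step re-summation of the window of previous terms by an incremental
-- sliding-window running sum; the return value is proved equal for all n ≥ 1.

-- ===== PORT A =====
-- loop body of A, extracted as a named helper (same code, step for step)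
def rabbits_fibb_step (m : Int) (dp : List Int) (i : Int) : List Int :=
  if i < m then dp.set i.toNat (PySem.List.slice dp none (some i)).sum
  else dp.set i.toNat (PySem.List.slice dp (some (i - m)) (some i)).sum

def rabbits_fibb (n : Int) (m : Int) : Int :=
  let dp0 := (List.replicate n.toNat (0 : Int)).set 0 1   -- dpArray=[0]*n; dpArray[0]=1 (raises on n ≤ 0: excluded by Pre_)
  let dp := (PySem.List.pyRange 1 n).foldl (rabbits_fibb_step m) dp0
  ((PySem.List.pyGet? dp (-1)).getD 0)                    -- dpArray[-1]

-- ===== PORT B =====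
-- loop body of B, extracted as a named helper (same code, step for step)
def rabbits_fibb_altStep (m : Int) (st : List Int × Int) (i : Int) : List Int × Int :=
  let dp := st.1.set i.toNat st.2
  let s := st.2 + PySem.List.pyGetD dp i 0
  let s := if 0 ≤ i - m then s - PySem.List.pyGetD dp (i - m) 0 else s
  (dp, s)

def rabbits_fibb_alt (n : Int) (m : Int) : Int :=
  if m ≤ 0 then (if n = 1 then 1 else 0)
  else
    let dp0 := (List.replicate n.toNat (0 : Int)).set 0 1
    let st := (PySem.List.pyRange 1 n).foldl (rabbits_fibb_altStep m) (dp0, 1)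
    PySem.List.pyGetD st.1 (n - 1) 0

-- ===== PRECONDITION & SPEC =====
-- Pre_ excludes exactly n ≤ 0, where A's 'dpArray[0]=1' raises IndexError on the empty list
def Pre_rabbits_fibb (n : Int) (m : Int) : Prop := 1 ≤ n
instance (n : Int) (m : Int) : Decidable (Pre_rabbits_fibb n m) := by unfold Pre_rabbits_fibb; infer_instance
def pvWitness_rabbits_fibb : Int × Int := (6, 3)

def Spec_rabbits_fibb (n : Int) (m : Int) (out : Int) : Prop := out = rabbits_fibb_alt n m
instance (n : Int) (m : Int) (out : Int) : Decidable (Spec_rabbits_fibb n m out) := by unfold Spec_rabbits_fibb; infer_instance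

-- ===== CLAIM (what is proved, stated in full; the proofs are below) =====
def Claim_equal_rabbits_fibb : Prop := ∀ (n : Int) (m : Int), Dom_rabbits_fibb n m → Pre_rabbits_fibb n m → Spec_rabbits_fibb n m (rabbits_fibb n m)

-- ===== LEMMAS AND PROOFS =====

-- the mathematical sequence both loops compute: fibVec m j = the list of the first j values
def fibVec (m : Nat) : Nat → List Int
  | 0 => []
  | j + 1 => fibVec m j ++ [if j = 0 then 1 else ((fibVec m j).drop (j - m)).sum]

theorem fibVec_length (m j : Nat) : (fibVec m j).length = j := by
  induction j with
  | zero => rfl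
  | succ j ih => simp [fibVec, ih]

theorem sum_drop_succ (t : Nat) (l : List Int) (h : t < l.length) :
    (l.drop t).sum = l.getD t 0 + (l.drop (t + 1)).sum := by
  rw [List.drop_eq_getElem_cons h]
  rw [List.sum_cons, List.getD_eq_getElem _ _ h]

theorem set_at_length (l t : List Int) (v x : Int) :
    (l ++ x :: t).set l.length v = l ++ v :: t := by
  simp

-- the set at position j turns (fibVec j ++ zeros) into (fibVec (j+1) ++ zeros)
theorem set_step (m : Nat) (j k : Nat) (h1 : 1 ≤ j) (h2 : j < k) :
    (fibVec m j ++ List.replicate (k - j) 0).set j ((fibVec m j).drop (j - m)).sum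
      = fibVec m (j + 1) ++ List.replicate (k - (j + 1)) 0 := by
  have hrep : List.replicate (k - j) (0:Int) = 0 :: List.replicate (k - (j+1)) 0 := by
    have : k - j = (k - (j+1)) + 1 := by omega
    rw [this, List.replicate_succ]
  have key := set_at_length (fibVec m j) (List.replicate (k - (j+1)) 0)
    ((fibVec m j).drop (j - m)).sum 0
  rw [fibVec_length] at key
  have hj : j ≠ 0 := by omega
  rw [hrep, key]
  simp [fibVec, hj]

-- A's window slice dp[i-m:i] on the concrete state is the tail window of fibVec
theorem slice_window (m : Int) (j k : Nat) (hmj : m ≤ (j : Int)) :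
    PySem.List.slice (fibVec m.toNat j ++ List.replicate (k - j) (0:Int))
        (some ((j : Int) - m)) (some (j : Int))
      = (fibVec m.toNat j).drop (j - m.toNat) := by
  rw [PySem.List.slice_toNat _ (by omega) (by omega)]
  by_cases hm0 : 0 ≤ m
  · have ha : ((j : Int) - m).toNat = j - m.toNat := by omega
    have hb : ((j : Int)).toNat = j := by omega
    rw [ha, hb, List.drop_append_of_le_length (by rw [fibVec_length]; omega)]
    exact List.take_left' (by simp [fibVec_length]; try omega)
  · have ha : j - ((j : Int) - m).toNat = 0 := by omega
    have hb : ((j : Int)).toNat = j := by omega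
    rw [hb, ha, List.take_zero]
    have hc : j - m.toNat = j := by omega
    rw [hc, List.drop_eq_nil_of_le (by simp [fibVec_length])]

theorem A_step (m : Int) (j k : Nat) (h1 : 1 ≤ j) (h2 : j < k) :
    rabbits_fibb_step m (fibVec m.toNat j ++ List.replicate (k - j) 0) (j : Int)
      = fibVec m.toNat (j + 1) ++ List.replicate (k - (j + 1)) 0 := by
  unfold rabbits_fibb_step
  by_cases hm : (j : Int) < m
  · rw [if_pos hm]
    have hslice : PySem.List.slice (fibVec m.toNat j ++ List.replicate (k - j) (0:Int))
        none (some (j : Int)) = fibVec m.toNat j := by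
      rw [PySem.List.slice_to _ (by omega), show ((j:Int)).toNat = j by omega]
      exact List.take_left' (fibVec_length _ _)
    rw [hslice, show ((j:Int)).toNat = j by omega]
    have hs := set_step m.toNat j k h1 h2
    rw [show j - m.toNat = 0 by omega, List.drop_zero] at hs
    exact hs
  · rw [if_neg hm, slice_window m j k (by omega), show ((j:Int)).toNat = j by omega]
    exact set_step m.toNat j k h1 h2

theorem fibVec_succ_getD (m : Nat) (j : Nat) (h1 : 1 ≤ j) (t : List Int) :
    (fibVec m (j + 1) ++ t).getD j 0 = ((fibVec m j).drop (j - m)).sum := by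
  rw [List.getD_append _ _ _ _ (by simp [fibVec_length]), fibVec,
    List.getD_append_right _ _ _ _ (by simp [fibVec_length])]
  simp [fibVec_length, show j ≠ 0 by omega]

theorem B_step (m : Int) (hm : 1 ≤ m) (j k : Nat) (h1 : 1 ≤ j) (h2 : j < k) :
    rabbits_fibb_altStep m (fibVec m.toNat j ++ List.replicate (k - j) 0,
        ((fibVec m.toNat j).drop (j - m.toNat)).sum) (j : Int)
      = (fibVec m.toNat (j + 1) ++ List.replicate (k - (j + 1)) 0,
        ((fibVec m.toNat (j + 1)).drop ((j + 1) - m.toNat)).sum) := by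
  have hset : (fibVec m.toNat j ++ List.replicate (k - j) (0:Int)).set ((j:Int)).toNat
      ((fibVec m.toNat j).drop (j - m.toNat)).sum
      = fibVec m.toNat (j + 1) ++ List.replicate (k - (j + 1)) 0 := by
    rw [show ((j:Int)).toNat = j by omega]
    exact set_step m.toNat j k h1 h2
  have hget1 : PySem.List.pyGetD
      (fibVec m.toNat (j + 1) ++ List.replicate (k - (j + 1)) (0:Int)) ((j : Nat) : Int) 0
      = ((fibVec m.toNat j).drop (j - m.toNat)).sum := by
    rw [PySem.List.pyGetD_natCast]
    exact fibVec_succ_getD m.toNat j h1 _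
  unfold rabbits_fibb_altStep
  simp only [hset, hget1]
  refine Prod.ext rfl ?_
  simp only []
  by_cases hc : m.toNat ≤ j
  · have hpos : 0 ≤ (j : Int) - m := by omega
    rw [if_pos hpos]
    have hcast : (j : Int) - m = ((j - m.toNat : Nat) : Int) := by omega
    have hget2 : PySem.List.pyGetD
        (fibVec m.toNat (j + 1) ++ List.replicate (k - (j + 1)) (0:Int)) ((j:Int) - m) 0
        = (fibVec m.toNat j).getD (j - m.toNat) 0 := by
      rw [hcast, PySem.List.pyGetD_natCast,
        List.getD_append _ _ _ _ (by simp [fibVec_length]; try omega)]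
      conv_lhs => rw [fibVec]
      rw [List.getD_append _ _ _ _ (by simp [fibVec_length]; try omega)]
    rw [hget2]
    have hSj : ((fibVec m.toNat j).drop (j - m.toNat)).sum
        = (fibVec m.toNat j).getD (j - m.toNat) 0 + ((fibVec m.toNat j).drop (j - m.toNat + 1)).sum :=
      sum_drop_succ _ _ (by rw [fibVec_length]; omega)
    have hfib : fibVec m.toNat (j + 1)
        = fibVec m.toNat j ++ [((fibVec m.toNat j).drop (j - m.toNat)).sum] := by
      rw [fibVec]; simp [show j ≠ 0 by omega]
    rw [hfib, show j + 1 - m.toNat = (j - m.toNat) + 1 by omega,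
      List.drop_append_of_le_length (by rw [fibVec_length]; omega), List.sum_append,
      List.sum_singleton]
    linarith [hSj]
  · have hneg : ¬ (0 ≤ (j : Int) - m) := by omega
    rw [if_neg hneg]
    have h0 : j - m.toNat = 0 := by omega
    have h0' : j + 1 - m.toNat = 0 := by omega
    have hfib : fibVec m.toNat (j + 1)
        = fibVec m.toNat j ++ [((fibVec m.toNat j).drop (j - m.toNat)).sum] := by
      rw [fibVec]; simp [show j ≠ 0 by omega]
    rw [hfib, h0, h0', List.drop_zero, List.drop_zero, List.sum_append, List.sum_singleton]

theorem lastD_cons_rep (t : Nat) (x : Int) :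
    ((x :: List.replicate t (0:Int)).getLast?).getD 0 = if t = 0 then x else 0 := by
  induction t generalizing x with
  | zero => rfl
  | succ t ih => rw [List.replicate_succ, List.getLast?_cons_cons, ih 0]; simp

theorem fibVec_zero (k : Nat) (hk : 1 ≤ k) :
    fibVec 0 k = 1 :: List.replicate (k - 1) 0 := by
  induction k with
  | zero => omega
  | succ k ih =>
    by_cases h : k = 0
    · subst h; rfl
    · rw [fibVec, ih (by omega)]
      rw [List.drop_eq_nil_of_le (by simp; omega)]
      simp [h]
      rw [show k = (k-1) + 1 by omega, List.replicate_succ']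
      simp

theorem A_inv (m : Int) (k : Nat) (j : Nat) (hj1 : 1 ≤ j) (hjk : j ≤ k) :
    (PySem.List.pyRange 1 (j : Int)).foldl (rabbits_fibb_step m)
      ((List.replicate k (0:Int)).set 0 1)
      = fibVec m.toNat j ++ List.replicate (k - j) 0 := by
  induction j with
  | zero => omega
  | succ j ih =>
    by_cases h : j = 0
    · subst h
      obtain ⟨k', rfl⟩ : ∃ k', k = k' + 1 := ⟨k - 1, by omega⟩
      show (PySem.List.pyRange 1 1).foldl _ _ = _
      rw [show PySem.List.pyRange 1 1 = [] from rfl]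
      simp [List.replicate_succ, fibVec]
    · rw [show ((j + 1 : Nat) : Int) = (j : Int) + 1 by push_cast; ring,
        PySem.List.pyRange_one_succ_right (by omega), List.foldl_append,
        ih (by omega) (by omega)]
      exact A_step m j k (by omega) (by omega)

theorem B_inv (m : Int) (hm : 1 ≤ m) (k : Nat) (j : Nat) (hj1 : 1 ≤ j) (hjk : j ≤ k) :
    (PySem.List.pyRange 1 (j : Int)).foldl (rabbits_fibb_altStep m)
      ((List.replicate k (0:Int)).set 0 1, 1)
      = (fibVec m.toNat j ++ List.replicate (k - j) 0,
         ((fibVec m.toNat j).drop (j - m.toNat)).sum) := by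
  induction j with
  | zero => omega
  | succ j ih =>
    by_cases h : j = 0
    · subst h
      obtain ⟨k', rfl⟩ : ∃ k', k = k' + 1 := ⟨k - 1, by omega⟩
      show (PySem.List.pyRange 1 1).foldl _ _ = _
      rw [show PySem.List.pyRange 1 1 = [] from rfl]
      simp [List.replicate_succ, fibVec, show 1 - m.toNat = 0 by omega]
    · rw [show ((j + 1 : Nat) : Int) = (j : Int) + 1 by push_cast; ring,
        PySem.List.pyRange_one_succ_right (by omega), List.foldl_append,
        ih (by omega) (by omega)]
      exact B_step m hm j k (by omega) (by omega)

-- ===== VERDICT (by name: the statement is the Claim_ definition above) =====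
theorem rabbits_fibb_spec : Claim_equal_rabbits_fibb := by
  intro n m _ hpre
  unfold Spec_rabbits_fibb
  unfold Pre_rabbits_fibb at hpre
  obtain ⟨k, rfl⟩ : ∃ k : Nat, n = (k : Int) := ⟨n.toNat, by omega⟩
  have hk : 1 ≤ k := by exact_mod_cast hpre
  simp only [rabbits_fibb, rabbits_fibb_alt, Int.toNat_natCast]
  rw [A_inv m k k hk le_rfl]
  by_cases hm : m ≤ 0
  · rw [if_pos hm, show m.toNat = 0 by omega, fibVec_zero k hk, Nat.sub_self,
      List.replicate_zero, List.append_nil, PySem.List.pyGet?_neg_one]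
    rw [lastD_cons_rep]
    split_ifs with h1 h2 h3 <;> try rfl
    · omega
    · omega
  · rw [if_neg hm, B_inv m (by omega) k k hk le_rfl, Nat.sub_self,
      List.replicate_zero, List.append_nil, PySem.List.pyGet?_neg_one,
      List.getLast?_eq_getElem?,
      show ((k : Int) - 1) = ((k - 1 : Nat) : Int) by omega, PySem.List.pyGetD_natCast]
    simp [List.getD_eq_getElem?_getD, fibVec_length]
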